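-- pv_equiv track=rewrite | github.com/wojtekcz/poetry2021 | preprocess_dataset.py | count_tok_lines
-- ===== SOURCE A (Python) =====
-- def count_tok_lines(file_lines_tok: [[str]], chunk_len: int):
--     # count how many last lines (almost) add up to chunk_len
--     sum_tok = 0
--     idx = 0
--     while True:
--         n = len(file_lines_tok[idx])
--         if sum_tok+n >= chunk_len or idx+1 >= len(file_lines_tok):
--             break
--         sum_tok += n
--         idx += 1
--
--     return idx
-- ===== SOURCE B (Python) =====
-- def count_tok_lines(file_lines_tok, chunk_len):
--     # Build a prefix-sum index of token counts, then count how many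
--     # prefixes stay strictly below chunk_len; cap at the last line index.
--     cum = []
--     total = 0
--     for line in file_lines_tok:
--         total += len(line)
--         cum.append(total)
--     full = sum(1 for c in cum if c < chunk_len)
--     return min(full, len(file_lines_tok) - 1)
-- ===== Notes on version B (the rewrite author's own statement) =====
-- stated objective: alternative
-- what changed: Replaces A's accumulate-and-break while-loop with building a prefix-sum index of token counts once and counting how many prefix sums stay below chunk_len, capped at the last line index.
import Mathlib
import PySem

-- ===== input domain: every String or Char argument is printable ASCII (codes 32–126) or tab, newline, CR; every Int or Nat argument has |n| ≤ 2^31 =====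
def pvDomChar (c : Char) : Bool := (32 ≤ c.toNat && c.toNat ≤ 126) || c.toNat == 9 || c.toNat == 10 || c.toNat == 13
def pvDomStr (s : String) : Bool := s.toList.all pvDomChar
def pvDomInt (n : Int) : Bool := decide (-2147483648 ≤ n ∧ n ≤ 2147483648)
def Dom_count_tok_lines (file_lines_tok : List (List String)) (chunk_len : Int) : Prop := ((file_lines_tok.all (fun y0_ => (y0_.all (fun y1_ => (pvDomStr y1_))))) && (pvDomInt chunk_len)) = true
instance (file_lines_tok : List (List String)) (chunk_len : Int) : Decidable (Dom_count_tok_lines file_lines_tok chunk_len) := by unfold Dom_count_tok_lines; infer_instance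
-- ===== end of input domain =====

-- B builds a prefix-sum index and counts prefixes below chunk_len instead of A's scan-and-break loop (alternative decomposition, same cost).
-- Pre_ excludes only the empty list, on which A raises IndexError.


-- ===== PORT A =====
-- the while-loop of A, as recursion on the suffix starting at file_lines_tok[idx];
-- the [] case is Python's IndexError (only reached on the empty list, excluded by Pre_)
def countTokLoop (chunk_len : Int) : List (List String) → Int → Int → Int
  | [], _, idx => idx
  | l :: rest, sum_tok, idx =>
    let n : Int := (l.length : Int)
    if sum_tok + n ≥ chunk_len ∨ rest = [] then idx
    else countTokLoop chunk_len rest (sum_tok + n) (idx + 1)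

def count_tok_lines (file_lines_tok : List (List String)) (chunk_len : Int) : Int :=
  countTokLoop chunk_len file_lines_tok 0 0

-- ===== PORT B =====
def count_tok_lines_alt (file_lines_tok : List (List String)) (chunk_len : Int) : Int :=
  let cum := (file_lines_tok.foldl
    (fun (acc : List Int × Int) (line : List String) =>
      let total := acc.2 + (line.length : Int)
      (acc.1 ++ [total], total)) ([], 0)).1
  let full : Int := (cum.countP (fun c => decide (c < chunk_len)) : Int)
  min full ((file_lines_tok.length : Int) - 1)

-- ===== PRECONDITION & SPEC =====
-- Pre_ excludes exactly the empty list, on which A raises IndexError at file_lines_tok[0].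
def Pre_count_tok_lines (file_lines_tok : List (List String)) (chunk_len : Int) : Prop :=
  file_lines_tok ≠ []
instance (file_lines_tok : List (List String)) (chunk_len : Int) : Decidable (Pre_count_tok_lines file_lines_tok chunk_len) := by unfold Pre_count_tok_lines; infer_instance

def pvWitness_count_tok_lines : List (List String) × Int := ([["a", "b"], ["c"]], 2)

def Spec_count_tok_lines (file_lines_tok : List (List String)) (chunk_len : Int) (out : Int) : Prop := out = count_tok_lines_alt file_lines_tok chunk_len
instance (file_lines_tok : List (List String)) (chunk_len : Int) (out : Int) : Decidable (Spec_count_tok_lines file_lines_tok chunk_len out) := by unfold Spec_count_tok_lines; infer_instance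

-- ===== CLAIM (what is proved, stated in full; the proofs are below) =====
def Claim_equal_count_tok_lines : Prop := ∀ (file_lines_tok : List (List String)) (chunk_len : Int), Dom_count_tok_lines file_lines_tok chunk_len → Pre_count_tok_lines file_lines_tok chunk_len → Spec_count_tok_lines file_lines_tok chunk_len (count_tok_lines file_lines_tok chunk_len)

-- ===== LEMMAS AND PROOFS =====

-- prefix sums of the token counts of the lines
def psums : List (List String) → List Int
  | [] => []
  | l :: r => (l.length : Int) :: (psums r).map (fun t => (l.length : Int) + t)

theorem psums_nonneg : ∀ (xs : List (List String)) (t : Int), t ∈ psums xs → 0 ≤ t := by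
  intro xs
  induction xs with
  | nil => intro t h; simp [psums] at h
  | cons l r ih =>
    intro t h
    simp only [psums, List.mem_cons, List.mem_map] at h
    rcases h with h | ⟨u, hu, rfl⟩
    · subst h; positivity
    · have := ih u hu; positivity

-- B's foldl builds exactly acc ++ (psums xs shifted by s)
theorem foldl_cum (xs : List (List String)) : ∀ (acc : List Int) (s : Int),
    (xs.foldl (fun (a : List Int × Int) (line : List String) =>
      (a.1 ++ [a.2 + (line.length : Int)], a.2 + (line.length : Int))) (acc, s)).1
    = acc ++ (psums xs).map (fun t => s + t) := by
  induction xs with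
  | nil => intro acc s; simp [psums]
  | cons l r ih =>
    intro acc s
    simp only [List.foldl_cons, psums]
    rw [ih]
    simp [List.map_map, Function.comp, add_assoc]

theorem countTokLoop_eq (chunk_len : Int) :
    ∀ (xs : List (List String)), xs ≠ [] → ∀ (s idx : Int),
    countTokLoop chunk_len xs s idx
      = idx + min (((psums xs).countP (fun t => decide (s + t < chunk_len)) : Int))
                  ((xs.length : Int) - 1) := by
  intro xs
  induction xs with
  | nil => intro h; exact absurd rfl h
  | cons l rest ih =>
    intro _ s idx
    by_cases hge : s + (l.length : Int) ≥ chunk_len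
    · -- loop stops immediately; no prefix sum is below chunk_len
      have hc0 : (psums (l :: rest)).countP (fun t => decide (s + t < chunk_len)) = 0 := by
        rw [List.countP_eq_zero]
        intro t ht
        simp only [psums, List.mem_cons, List.mem_map] at ht
        rcases ht with rfl | ⟨u, hu, rfl⟩
        · simp only [decide_eq_true_eq]; omega
        · have := psums_nonneg rest u hu
          simp only [decide_eq_true_eq]; omega
      simp only [countTokLoop, if_pos (Or.inl hge), hc0, List.length_cons]
      have : (0 : Int) ≤ (rest.length : Int) := by positivity
      push_cast
      omega
    · by_cases hrest : rest = []
      · subst hrest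
        simp only [countTokLoop, psums, List.length_cons,
          List.length_nil, List.map_nil, List.countP_cons, List.countP_nil]
        have : decide (s + (l.length : Int) < chunk_len) = true := by
          simp only [decide_eq_true_eq]; omega
        rw [this]
        simp
      · rw [show countTokLoop chunk_len (l :: rest) s idx
            = countTokLoop chunk_len rest (s + (l.length : Int)) (idx + 1) from by
          simp only [countTokLoop]
          rw [if_neg]
          rintro (h | h)
          · exact hge h
          · exact hrest h]
        rw [ih hrest (s + (l.length : Int)) (idx + 1)]
        have hmap : ((psums rest).map (fun t => (l.length : Int) + t)).countP
              (fun t => decide (s + t < chunk_len))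
            = (psums rest).countP (fun t => decide (s + (l.length : Int) + t < chunk_len)) := by
          rw [List.countP_map]
          apply List.countP_congr
          intro t _
          simp only [Function.comp_apply, decide_eq_true_eq]
          constructor <;> intro <;> omega
        have hhead : decide (s + (l.length : Int) < chunk_len) = true := by
          simp only [decide_eq_true_eq]; omega
        simp only [psums, List.countP_cons, hmap, hhead, List.length_cons]
        have hlr : 0 < rest.length := List.length_pos_of_ne_nil hrest
        push_cast
        omega

theorem count_tok_lines_spec : Claim_equal_count_tok_lines := by
  intro xs chunk_len _ hpre
  unfold Spec_count_tok_lines count_tok_lines count_tok_lines_alt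
  rw [countTokLoop_eq chunk_len xs hpre 0 0]
  rw [foldl_cum xs [] 0]
  simp

-- ===== VERDICT (by name: the statement is the Claim_ definition above) =====
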